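-- pv_equiv track=rewrite | github.com/idtareq/mandelbrot-python-visualizer | util.py | divide_into_ranges
-- ===== SOURCE A (Python) =====
-- def divide_into_ranges(N, K):
--     """
--     Divide numbers from 0 to N-1 into K nearly equal ranges.
--
--     Parameters:
--     - N (int): The total number of elements (from 0 to N-1).
--     - K (int): The number of ranges to divide into.
--
--     Returns:
--     - List[List[int, int]]: A list of [start, end] pairs representing each range.
--     """
--     if not N:
--         return []
--
--     if not K:
--         raise ValueError("K can't be zero")
--
--     ranges = []
--     base_size = N // K
--     remainder = N % K
--     start = 0
--
--     for i in range(K):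
--         # Calculate the size of this range
--         size = base_size + (1 if remainder > 0 else 0)
--         end = start + size - 1
--         ranges.append([start, end])
--         start = end + 1
--         if remainder > 0:
--             remainder -= 1
--
--     return ranges
-- ===== SOURCE B (Python) =====
-- def divide_into_ranges(N, K):
--     """Divide numbers from 0 to N-1 into K nearly equal ranges."""
--     if not N:
--         return []
--     if not K:
--         raise ValueError("K can't be zero")
--     base, rem = divmod(N, K)
--     return [[i * base + min(i, rem), (i + 1) * base + min(i + 1, rem) - 1]
--             for i in range(K)]
-- ===== Notes on version B (the rewrite author's own statement) =====
-- stated objective: simpler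
-- what changed: Replaced the loop that threads a start position and a decrementing remainder through K iterations by a stateless comprehension computing each range from the closed formula start_i = i*base + min(i, rem).
import Mathlib
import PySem

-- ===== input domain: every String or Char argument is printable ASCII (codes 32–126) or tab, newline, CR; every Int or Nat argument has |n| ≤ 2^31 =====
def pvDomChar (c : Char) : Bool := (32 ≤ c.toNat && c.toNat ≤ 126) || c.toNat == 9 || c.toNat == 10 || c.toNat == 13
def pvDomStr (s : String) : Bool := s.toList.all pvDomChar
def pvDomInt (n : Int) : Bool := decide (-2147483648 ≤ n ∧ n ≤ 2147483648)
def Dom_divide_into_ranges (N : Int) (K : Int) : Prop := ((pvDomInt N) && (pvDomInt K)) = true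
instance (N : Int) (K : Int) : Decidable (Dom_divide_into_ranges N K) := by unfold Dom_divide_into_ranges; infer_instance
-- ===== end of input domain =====

-- B replaces A's threaded start/remainder accumulator with a stateless per-index closed formula (objective: simpler).


-- ===== PORT A =====
-- one iteration of A's loop body: state is (ranges, start, remainder); the loop index is unused
def pvStepA (base : Int) (s : List (List Int) × Int × Int) (_i : Int) : List (List Int) × Int × Int :=
  let size := base + (if s.2.2 > 0 then (1 : Int) else 0)
  let e := s.2.1 + size - 1
  (s.1 ++ [[s.2.1, e]], e + 1, if s.2.2 > 0 then s.2.2 - 1 else s.2.2)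

def divide_into_ranges (N : Int) (K : Int) : List (List Int) :=
  if N = 0 then []
  else
    -- Pre_ excludes K = 0 here (Python raises ValueError)
    let base := PySem.Int.floordiv N K
    let rem := PySem.Int.mod N K
    ((PySem.List.pyRange 0 K 1).foldl (pvStepA base) ([], 0, rem)).1

-- ===== PORT B =====
def divide_into_ranges_alt (N : Int) (K : Int) : List (List Int) :=
  if N = 0 then []
  else
    let base := PySem.Int.floordiv N K
    let rem := PySem.Int.mod N K
    (PySem.List.pyRange 0 K 1).map (fun i =>
      [i * base + min i rem, (i + 1) * base + min (i + 1) rem - 1])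

-- ===== PRECONDITION & SPEC =====
-- Pre_ excludes exactly the inputs where A raises ValueError: N ≠ 0 and K = 0
def Pre_divide_into_ranges (N : Int) (K : Int) : Prop := N = 0 ∨ K ≠ 0
instance (N : Int) (K : Int) : Decidable (Pre_divide_into_ranges N K) := by unfold Pre_divide_into_ranges; infer_instance
def pvWitness_divide_into_ranges : Int × Int := (10, 3)

def Spec_divide_into_ranges (N : Int) (K : Int) (out : List (List Int)) : Prop := out = divide_into_ranges_alt N K
instance (N : Int) (K : Int) (out : List (List Int)) : Decidable (Spec_divide_into_ranges N K out) := by unfold Spec_divide_into_ranges; infer_instance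

-- ===== CLAIM (what is proved, stated in full; the proofs are below) =====
def Claim_equal_divide_into_ranges : Prop := ∀ (N : Int) (K : Int), Dom_divide_into_ranges N K → Pre_divide_into_ranges N K → Spec_divide_into_ranges N K (divide_into_ranges N K)

-- ===== LEMMAS AND PROOFS =====

-- loop invariant: after n iterations the state is the closed form B computes
lemma pvLoopA_inv (base rem : Int) (h : 0 ≤ rem) (n : ℕ) :
    (PySem.List.pyRange 0 n 1).foldl (pvStepA base) ([], 0, rem)
    = ((PySem.List.pyRange 0 n 1).map (fun i =>
          [i * base + min i rem, (i + 1) * base + min (i + 1) rem - 1]),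
       n * base + min (n : Int) rem, rem - min (n : Int) rem) := by
  induction n with
  | zero => simp; omega
  | succ n ih =>
    have hsplit : PySem.List.pyRange 0 ((n : Int) + 1) 1
        = PySem.List.pyRange 0 (n : Int) 1 ++ [(n : Int)] :=
      PySem.List.pyRange_one_succ_right (by exact_mod_cast Nat.zero_le n)
    push_cast
    rw [hsplit, List.foldl_append, List.map_append, ih]
    simp only [List.foldl_cons, List.foldl_nil, pvStepA, List.map_cons, List.map_nil]
    have hb : ((n : Int) + 1) * base = (n : Int) * base + base := by ring
    refine Prod.ext ?_ (Prod.ext ?_ ?_) <;> simp [hb] <;>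
      (generalize (n : Int) * base = p) <;> split_ifs <;> omega

-- ===== VERDICT (by name: the statement is the Claim_ definition above) =====
theorem divide_into_ranges_spec : Claim_equal_divide_into_ranges := by
  intro N K _hdom hpre
  unfold Spec_divide_into_ranges divide_into_ranges divide_into_ranges_alt
  by_cases hN : N = 0
  · simp [hN]
  · have hK : K ≠ 0 := by rcases hpre with h | h; exact absurd h hN; exact h
    simp only [hN, if_false]
    by_cases hKpos : 0 < K
    · have hrem : 0 ≤ PySem.Int.mod N K := PySem.Int.mod_nonneg N hKpos
      have hcast : K = ((K.toNat : Int)) := by omega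
      rw [hcast] at hrem ⊢
      rw [pvLoopA_inv _ _ hrem]
    · have hnil : PySem.List.pyRange 0 K 1 = [] :=
        PySem.List.pyRange_one_eq_nil (by omega)
      rw [hnil]; simp
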